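-- pv_equiv track=rewrite | github.com/rhy3h/django-stock | stockapp/stockapp/wantgoo/institutional_investors.py | continuous
-- ===== SOURCE A (Python) =====
-- def continuous(stock_data):
--     data = {
--         'sumForeign': None,
--         'sumING': None,
--         'sumDealer': None
--     }
--
--     positiveForeign = -1
--     positiveING = -1
--     positiveDealer = -1
--     negativeForeign = -1
--     negativeING = -1
--     negativeDealer = -1
--
--     if len(stock_data) < 10:
--         return data
--     count = 0
--     for stock in stock_data:
--         sumForeign = int(stock[1])
--         sumING = int(stock[2])
--         sumDealer = int(stock[3])
--
--         if positiveForeign == -1 and sumForeign <= 0: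
--             positiveForeign = count
--         if negativeForeign == -1 and sumForeign >= 0:
--             negativeForeign = count
--
--         if positiveING == -1 and sumING <= 0:
--             positiveING = count
--         if negativeING == -1 and sumING >= 0:
--             negativeING = count
--
--         if positiveDealer == -1 and sumDealer <= 0:
--             positiveDealer = count
--         if negativeDealer == -1 and sumDealer >= 0:
--             negativeDealer = count
--
--         count += 1
--
--     if positiveForeign > negativeForeign:
--         data['sumForeign'] = positiveForeign
--     else:
--         data['sumForeign'] = -negativeForeign
--     if data['sumForeign'] == 0 and int(stock_data[0][1]) != 0:
--         data['sumForeign'] = 10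
--
--     if positiveING > negativeING:
--         data['sumING'] = positiveING
--     else:
--         data['sumING'] = -negativeING
--     if data['sumING'] == 0 and int(stock_data[0][2]) != 0:
--         data['sumING'] = 10
--
--     if positiveDealer > negativeDealer:
--         data['sumDealer'] = positiveDealer
--     else:
--         data['sumDealer'] = -negativeDealer
--     if data['sumDealer'] == 0 and int(stock_data[0][3]) != 0:
--         data['sumDealer'] = 10
--
--     return data
-- ===== SOURCE B (Python) =====
-- def _first_index(vs, pred):
--     return next((i for i, v in enumerate(vs) if pred(v)), -1)
--
--
-- def _col(vs):
--     pos = _first_index(vs, lambda v: v <= 0)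
--     neg = _first_index(vs, lambda v: v >= 0)
--     value = pos if pos > neg else -neg
--     if value == 0 and vs[0] != 0:
--         value = 10
--     return value
--
--
-- def continuous(stock_data):
--     if len(stock_data) < 10:
--         return {'sumForeign': None, 'sumING': None, 'sumDealer': None}
--     triples = [(int(r[1]), int(r[2]), int(r[3])) for r in stock_data]
--     return {
--         'sumForeign': _col([t[0] for t in triples]),
--         'sumING': _col([t[1] for t in triples]),
--         'sumDealer': _col([t[2] for t in triples]),
--     }
-- ===== Notes on version B (the rewrite author's own statement) =====
-- stated objective: alternative
-- what changed: Replaces A's single interleaved loop maintaining six sentinel indices with a parse pass into (foreign, ing, dealer) triples followed by three independent per-column first-index scans via next(enumerate(...)).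
import Mathlib
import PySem

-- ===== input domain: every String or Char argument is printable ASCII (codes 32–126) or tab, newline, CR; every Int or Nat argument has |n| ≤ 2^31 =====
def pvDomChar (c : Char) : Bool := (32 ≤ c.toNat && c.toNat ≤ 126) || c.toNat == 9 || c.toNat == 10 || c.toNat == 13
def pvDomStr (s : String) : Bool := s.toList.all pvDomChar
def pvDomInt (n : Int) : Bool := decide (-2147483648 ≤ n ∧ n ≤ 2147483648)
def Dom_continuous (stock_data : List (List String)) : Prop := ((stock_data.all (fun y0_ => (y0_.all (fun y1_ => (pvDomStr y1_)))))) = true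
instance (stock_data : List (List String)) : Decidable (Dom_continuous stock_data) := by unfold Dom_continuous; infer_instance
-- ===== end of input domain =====

-- B replaces A's single interleaved six-sentinel loop by a parse pass followed by three
-- independent per-column first-index scans (objective: alternative decomposition, same cost).

-- ===== PORT A =====
-- int(stock[i]) totalized with 0 defaults; Pre_continuous excludes exactly the inputs where Python raises
def pvCell (row : List String) (i : Int) : Int :=
  (PySem.Int.ofStr? ((PySem.List.pyGet? row i).getD "")).getD 0

-- state: (count, posF, negF, posI, negI, posD, negD)
def pvStepA (s : Int × Int × Int × Int × Int × Int × Int) (stock : List String) :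
    Int × Int × Int × Int × Int × Int × Int :=
  let (count, pF, nF, pI, nI, pD, nD) := s
  let sumF := pvCell stock 1
  let sumI := pvCell stock 2
  let sumD := pvCell stock 3
  let pF := if pF = -1 ∧ sumF ≤ 0 then count else pF
  let nF := if nF = -1 ∧ sumF ≥ 0 then count else nF
  let pI := if pI = -1 ∧ sumI ≤ 0 then count else pI
  let nI := if nI = -1 ∧ sumI ≥ 0 then count else nI
  let pD := if pD = -1 ∧ sumD ≤ 0 then count else pD
  let nD := if nD = -1 ∧ sumD ≥ 0 then count else nD
  (count + 1, pF, nF, pI, nI, pD, nD)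

def pvFinishA (p n : Int) (head0 : Int) : Int :=
  let v := if p > n then p else -n
  if v = 0 ∧ head0 ≠ 0 then 10 else v

def continuous (stock_data : List (List String)) : List (String × Option Int) :=
  if stock_data.length < 10 then
    [("sumForeign", none), ("sumING", none), ("sumDealer", none)]
  else
    let (_, pF, nF, pI, nI, pD, nD) :=
      stock_data.foldl pvStepA (0, -1, -1, -1, -1, -1, -1)
    let head := (PySem.List.pyGet? stock_data 0).getD []
    [("sumForeign", some (pvFinishA pF nF (pvCell head 1))),
     ("sumING",     some (pvFinishA pI nI (pvCell head 2))),
     ("sumDealer",  some (pvFinishA pD nD (pvCell head 3)))]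

-- ===== PORT B =====
-- next((i for i, v in enumerate(vs) if pred(v)), -1)
def pvFirstIndex (vs : List Int) (pred : Int → Bool) : Int :=
  match vs.findIdx? pred with
  | some i => (i : Int)
  | none => -1

def pvColB (vs : List Int) : Int :=
  let pos := pvFirstIndex vs (fun v => v ≤ 0)
  let neg := pvFirstIndex vs (fun v => v ≥ 0)
  let value := if pos > neg then pos else -neg
  if value = 0 ∧ vs.headD 0 ≠ 0 then 10 else value

def continuous_alt (stock_data : List (List String)) : List (String × Option Int) :=
  if stock_data.length < 10 then
    [("sumForeign", none), ("sumING", none), ("sumDealer", none)]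
  else
    let triples := stock_data.map (fun r => (pvCell r 1, pvCell r 2, pvCell r 3))
    [("sumForeign", some (pvColB (triples.map (·.1)))),
     ("sumING",     some (pvColB (triples.map (·.2.1)))),
     ("sumDealer",  some (pvColB (triples.map (·.2.2))))]

-- ===== PRECONDITION & SPEC =====
-- Pre_ excludes exactly the inputs where Python A raises: with ≥ 10 rows, every row must have
-- cells at indices 1,2,3 (else IndexError) that parse as ints (else ValueError).
def pvRowOK (row : List String) : Bool :=
  [(1 : Int), 2, 3].all fun i =>
    match PySem.List.pyGet? row i with
    | some s => (PySem.Int.ofStr? s).isSome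
    | none => false

def Pre_continuous (stock_data : List (List String)) : Prop :=
  stock_data.length < 10 ∨ stock_data.all pvRowOK = true
instance (stock_data : List (List String)) : Decidable (Pre_continuous stock_data) := by
  unfold Pre_continuous; infer_instance

def pvWitness_continuous : List (List String) :=
  List.replicate 10 ["x", "1", "-2", "0"]

def Spec_continuous (stock_data : List (List String)) (out : List (String × Option Int)) : Prop := out = continuous_alt stock_data
instance (stock_data : List (List String)) (out : List (String × Option Int)) : Decidable (Spec_continuous stock_data out) := by unfold Spec_continuous; infer_instance

-- ===== CLAIM (what is proved, stated in full; the proofs are below) =====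
def Claim_equal_continuous : Prop := ∀ (stock_data : List (List String)), Dom_continuous stock_data → Pre_continuous stock_data → Spec_continuous stock_data (continuous stock_data)

-- ===== LEMMAS AND PROOFS =====

-- how a single sentinel evolves: -1 means "not yet found"; once set it stays
def pvSent (p : Int) (vs : List Int) (c : Int) (pred : Int → Bool) : Int :=
  if p = -1 then
    match vs.findIdx? pred with
    | some i => c + (i : Int)
    | none => -1
  else p

theorem pvSent_step (p v : Int) (vs : List Int) (c : Int) (pred : Int → Bool) (hc : 0 ≤ c) :
    pvSent p (v :: vs) c pred =
      pvSent (if p = -1 ∧ pred v then c else p) vs (c + 1) pred := by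
  by_cases hp : p = -1
  · by_cases hv : pred v = true
    · have hc' : ¬(c = -1) := by omega
      simp [pvSent, hp, hv, hc', List.findIdx?_cons]
    · cases h : vs.findIdx? pred with
      | none => simp [pvSent, hp, hv, List.findIdx?_cons, h]
      | some i =>
        simp [pvSent, hp, hv, List.findIdx?_cons, h]
        omega
  · simp [pvSent, hp]

theorem foldA_eq (l : List (List String)) (c pF nF pI nI pD nD : Int) (hc : 0 ≤ c) :
    l.foldl pvStepA (c, pF, nF, pI, nI, pD, nD) =
      (c + l.length,
       pvSent pF (l.map (fun r => pvCell r 1)) c (fun v => v ≤ 0),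
       pvSent nF (l.map (fun r => pvCell r 1)) c (fun v => v ≥ 0),
       pvSent pI (l.map (fun r => pvCell r 2)) c (fun v => v ≤ 0),
       pvSent nI (l.map (fun r => pvCell r 2)) c (fun v => v ≥ 0),
       pvSent pD (l.map (fun r => pvCell r 3)) c (fun v => v ≤ 0),
       pvSent nD (l.map (fun r => pvCell r 3)) c (fun v => v ≥ 0)) := by
  induction l generalizing c pF nF pI nI pD nD with
  | nil => simp [pvSent]
  | cons r t ih =>
    simp only [List.foldl_cons, List.map_cons, List.length_cons, pvStepA]
    rw [ih _ _ _ _ _ _ _ (by omega)]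
    rw [pvSent_step pF _ _ _ _ hc, pvSent_step nF _ _ _ _ hc, pvSent_step pI _ _ _ _ hc,
        pvSent_step nI _ _ _ _ hc, pvSent_step pD _ _ _ _ hc, pvSent_step nD _ _ _ _ hc]
    simp only [Prod.mk.injEq, decide_eq_true_eq, and_true]
    push_cast; ring

theorem pvSent_zero (vs : List Int) (pred : Int → Bool) :
    pvSent (-1) vs 0 pred = pvFirstIndex vs pred := by
  simp only [pvSent, pvFirstIndex]
  cases vs.findIdx? pred <;> simp

-- ===== VERDICT (by name: the statement is the Claim_ definition above) =====
theorem continuous_spec : Claim_equal_continuous := by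
  intro sd _ _
  unfold Spec_continuous continuous continuous_alt
  by_cases h : sd.length < 10
  · simp [h]
  · have hne : sd ≠ [] := by
      intro he; rw [he] at h; simp at h
    obtain ⟨r, t, rfl⟩ := List.exists_cons_of_ne_nil hne
    rw [if_neg h, if_neg h]
    rw [foldA_eq _ _ _ _ _ _ _ _ (by omega)]
    simp only [pvSent_zero]
    simp [pvColB, pvFinishA, PySem.List.pyGet?, PySem.List.pyIdx?, List.map_map, Function.comp_def]
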